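-- pv_equiv track=rewrite | github.com/fabianruiz3/pokerbots-2026 | Camello_2.0.0/generate.py | normalize_hand
-- ===== SOURCE A (Python) =====
-- def normalize_hand(cards):
--     """
--     Normalize a 3-card hand to its canonical form.
--
--     Returns a tuple representing the hand class:
--     - Ranks in descending order
--     - Suit pattern (0=offsuit, 1=two suited, 2=three suited)
--
--     Examples:
--     - Ah Kh Qh → (14,13,12,2) [three suited]
--     - Ah Ks Qh → (14,13,12,0) [offsuit]
--     - Ah Kh Qd → (14,13,12,1) [two suited, high cards suited]
--     """
--     rank_map = {'2':2,'3':3,'4':4,'5':5,'6':6,'7':7,'8':8,'9':9,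
--                 'T':10,'J':11,'Q':12,'K':13,'A':14}
--
--     # Extract ranks and suits
--     ranks = []
--     suits = []
--     for card in cards:
--         card_str = str(card)
--         ranks.append(rank_map[card_str[0]])
--         suits.append(card_str[1])
--
--     # Sort ranks descending
--     ranks.sort(reverse=True)
--
--     # Determine suit pattern
--     if suits[0] == suits[1] == suits[2]:
--         suit_pattern = 2  # Three suited (best flush potential)
--     elif suits[0] == suits[1] or suits[1] == suits[2] or suits[0] == suits[2]:
--         # Two suited - normalize so highest two cards are suited
--         if suits[0] == suits[1]:
--             suit_pattern = 1  # Highest two suited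
--         elif suits[0] == suits[2]:
--             suit_pattern = 1  # First and third
--         else:
--             suit_pattern = 1  # Second and third
--     else:
--         suit_pattern = 0  # Rainbow (no flush potential)
--
--     return (ranks[0], ranks[1], ranks[2], suit_pattern)
-- ===== SOURCE B (Python) =====
-- def normalize_hand(cards):
--     rank_map = {'2':2,'3':3,'4':4,'5':5,'6':6,'7':7,'8':8,'9':9,
--                 'T':10,'J':11,'Q':12,'K':13,'A':14}
--     # Bucket-count the ranks (counting sort) instead of comparison-sorting.
--     freq = [0] * 15
--     for card in cards:
--         freq[rank_map[str(card)[0]]] += 1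
--     # Emit the three highest ranks by scanning the buckets from ace downward.
--     top = []
--     for r in range(14, 1, -1):
--         top += [r] * freq[r]
--         if len(top) >= 3:
--             break
--     # Suit pattern = (max multiplicity of a suit among the first three cards) - 1.
--     suit_count = {}
--     for card in cards[:3]:
--         s = str(card)[1]
--         suit_count[s] = suit_count.get(s, 0) + 1
--     return (top[0], top[1], top[2], max(suit_count.values()) - 1)
-- ===== Notes on version B (the rewrite author's own statement) =====
-- stated objective: alternative
-- what changed: Replaces the comparison sort of the ranks by a counting (bucket) sort scanned from ace down with early exit, and the three-branch suit-comparison cascade by a suit-multiplicity counter whose maximum minus one is the pattern.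
import Mathlib
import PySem

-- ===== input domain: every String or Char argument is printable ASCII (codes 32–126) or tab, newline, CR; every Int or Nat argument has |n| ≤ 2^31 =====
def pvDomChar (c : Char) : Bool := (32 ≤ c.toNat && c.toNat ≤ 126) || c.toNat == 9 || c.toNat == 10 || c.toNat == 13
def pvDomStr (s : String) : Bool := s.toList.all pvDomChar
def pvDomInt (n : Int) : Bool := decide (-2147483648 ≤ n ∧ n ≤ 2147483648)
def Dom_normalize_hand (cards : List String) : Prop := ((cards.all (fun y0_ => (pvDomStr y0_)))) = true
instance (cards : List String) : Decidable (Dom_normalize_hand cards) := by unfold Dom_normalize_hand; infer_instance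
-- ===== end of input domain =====

-- B replaces A's comparison sort of the ranks by a counting (bucket) sort scanned from ace down,
-- and A's three-branch suit cascade by a suit-multiplicity counter (pattern = max multiplicity - 1).

-- ===== PORT A =====
def rankMapA : PySem.Dict Char Int := PySem.Dict.ofList
  [('2',2),('3',3),('4',4),('5',5),('6',6),('7',7),('8',8),('9',9),
   ('T',10),('J',11),('Q',12),('K',13),('A',14)]

def normalize_hand (cards : List String) : Int × Int × Int × Int :=
  -- for card in cards: ranks.append(rank_map[card_str[0]]); suits.append(card_str[1])
  -- (the defaults of getD/pyGetD are never used under Pre_: the key is present and the index in range)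
  let rs := cards.foldl
    (fun (acc : List Int × List Char) card =>
      let cl := card.toList
      (acc.1 ++ [PySem.Dict.getD rankMapA (PySem.List.pyGetD cl 0 ' ') 0],
       acc.2 ++ [PySem.List.pyGetD cl 1 ' '])) ([], [])
  let ranks := PySem.List.sorted rs.1 (fun x => x) true
  let suits := rs.2
  let s0 := PySem.List.pyGetD suits 0 ' '
  let s1 := PySem.List.pyGetD suits 1 ' '
  let s2 := PySem.List.pyGetD suits 2 ' '
  let suit_pattern : Int :=
    if s0 = s1 ∧ s1 = s2 then 2
    else if s0 = s1 ∨ s1 = s2 ∨ s0 = s2 then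
      (if s0 = s1 then 1 else if s0 = s2 then 1 else 1)
    else 0
  (PySem.List.pyGetD ranks 0 0, PySem.List.pyGetD ranks 1 0,
   PySem.List.pyGetD ranks 2 0, suit_pattern)

-- ===== PORT B =====  (rank_map is the same literal dict; rankMapA is shared as a constant)
-- freq[i] += 1  (in Source B the index is rank_map[...] ∈ 2..14, nonnegative and in range, so toNat is exact)
def listIncr : List Int → Nat → List Int
  | [], _ => []
  | x :: t, 0 => (x + 1) :: t
  | x :: t, n + 1 => x :: listIncr t n

def normalize_hand_alt (cards : List String) : Int × Int × Int × Int :=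
  -- freq = [0]*15; for card in cards: freq[rank_map[str(card)[0]]] += 1
  let freq := cards.foldl
    (fun freq card =>
      listIncr freq (PySem.Dict.getD rankMapA (PySem.List.pyGetD card.toList 0 ' ') 0).toNat)
    (List.replicate 15 (0 : Int))
  -- for r in range(14,1,-1): top += [r]*freq[r]; if len(top) >= 3: break
  -- (the break is encoded as: once len(top) ≥ 3 the remaining iterations do nothing)
  let top := (PySem.List.pyRange 14 1 (-1)).foldl
    (fun (top : List Int) r =>
      if 3 ≤ top.length then top
      else top ++ List.replicate (PySem.List.pyGetD freq r 0).toNat r) []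
  -- suit_count = {}; for card in cards[:3]: s = str(card)[1]; suit_count[s] = suit_count.get(s,0)+1
  let suit_count := (PySem.List.slice cards none (some 3)).foldl
    (fun (d : PySem.Dict Char Int) card =>
      let s := PySem.List.pyGetD card.toList 1 ' '
      PySem.Dict.insert d s (PySem.Dict.getD d s 0 + 1))
    PySem.Dict.empty
  -- max(suit_count.values()) - 1  (suit_count is nonempty under Pre_, so the getD default is never used)
  (PySem.List.pyGetD top 0 0, PySem.List.pyGetD top 1 0, PySem.List.pyGetD top 2 0,
   ((PySem.List.max? (PySem.Dict.values suit_count) (fun v => v)).getD 0) - 1)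

-- ===== PRECONDITION & SPEC =====
-- Pre_ excludes exactly the inputs on which A raises: fewer than 3 cards (IndexError on
-- suits[2] / ranks[2]), a card shorter than 2 characters (IndexError), or a first
-- character that is not a rank (KeyError).
def Pre_normalize_hand (cards : List String) : Prop :=
  3 ≤ cards.length ∧
  ∀ c ∈ cards, 2 ≤ c.toList.length ∧
    c.toList.headD ' ' ∈ ['2','3','4','5','6','7','8','9','T','J','Q','K','A']
instance (cards : List String) : Decidable (Pre_normalize_hand cards) := by
  unfold Pre_normalize_hand; infer_instance

def pvWitness_normalize_hand : List String := ["Ah", "Ks", "Qh"]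

def Spec_normalize_hand (cards : List String) (out : Int × Int × Int × Int) : Prop := out = normalize_hand_alt cards
instance (cards : List String) (out : Int × Int × Int × Int) : Decidable (Spec_normalize_hand cards out) := by unfold Spec_normalize_hand; infer_instance

-- ===== CLAIM (what is proved, stated in full; the proofs are below) =====
def Claim_equal_normalize_hand : Prop := ∀ (cards : List String), Dom_normalize_hand cards → Pre_normalize_hand cards → Spec_normalize_hand cards (normalize_hand cards)

-- ===== LEMMAS AND PROOFS =====

-- A's accumulator loop builds exactly the two mapped lists.
theorem nh_foldl_eq_map (cards : List String) (rs : List Int) (ss : List Char) :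
    cards.foldl
      (fun (acc : List Int × List Char) card =>
        let cl := card.toList
        (acc.1 ++ [PySem.Dict.getD rankMapA (PySem.List.pyGetD cl 0 ' ') 0],
         acc.2 ++ [PySem.List.pyGetD cl 1 ' '])) (rs, ss)
    = (rs ++ cards.map (fun card => PySem.Dict.getD rankMapA (PySem.List.pyGetD card.toList 0 ' ') 0),
       ss ++ cards.map (fun card => PySem.List.pyGetD card.toList 1 ' ')) := by
  induction cards generalizing rs ss with
  | nil => simp
  | cons c t ih => simp [List.foldl_cons, ih]

theorem nh_pyGetD_zero {α : Type} [Inhabited α] (x : α) (l : List α) (d : α) :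
    PySem.List.pyGetD (x :: l) 0 d = x := by
  simp

theorem nh_pyGetD_one {α : Type} [Inhabited α] (x y : α) (l : List α) (d : α) :
    PySem.List.pyGetD (x :: y :: l) 1 d = y := by
  simpa using PySem.List.pyGetD_natCast (x :: y :: l) 1 d

theorem nh_pyGetD_two {α : Type} [Inhabited α] (x y z : α) (l : List α) (d : α) :
    PySem.List.pyGetD (x :: y :: z :: l) 2 d = z := by
  simpa using PySem.List.pyGetD_natCast (x :: y :: z :: l) 2 d

theorem nh_pyGetD_getD (xs : List Int) (i : Nat) :
    PySem.List.pyGetD xs (i : Int) 0 = xs.getD i 0 := PySem.List.pyGetD_natCast xs i 0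

-- every rank value coming from a rank character lies between 2 and 14
theorem nh_rank_bounds (d : Char)
    (h : d ∈ ['2','3','4','5','6','7','8','9','T','J','Q','K','A']) :
    2 ≤ PySem.Dict.getD rankMapA d 0 ∧ PySem.Dict.getD rankMapA d 0 ≤ 14 := by
  fin_cases h <;> decide

-- --- the freq[...] += 1 loop is a bucket counter ---
theorem listIncr_length (f : List Int) (i : Nat) : (listIncr f i).length = f.length := by
  induction f generalizing i with
  | nil => rfl
  | cons x t ih => cases i with
    | zero => rfl
    | succ n => simp [listIncr, ih]

theorem listIncr_getD (f : List Int) (i j : Nat) (hi : i < f.length) :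
    (listIncr f i).getD j 0 = f.getD j 0 + if j = i then 1 else 0 := by
  induction f generalizing i j with
  | nil => simp at hi
  | cons x t ih =>
    cases i with
    | zero => cases j <;> simp [listIncr]
    | succ n =>
      cases j with
      | zero => simp [listIncr]
      | succ m => simpa [listIncr] using ih n m (by simpa using hi)

theorem freq_fold_getD (l : List Nat) (f : List Int) (hl : ∀ i ∈ l, i < f.length) (j : Nat) :
    (l.foldl (fun f i => listIncr f i) f).getD j 0 = f.getD j 0 + l.count j := by
  induction l generalizing f with
  | nil => simp
  | cons i t ih =>
    rw [List.foldl_cons, ih _ (fun x hx => by rw [listIncr_length]; exact hl x (List.mem_cons_of_mem _ hx)),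
      listIncr_getD f i j (hl i (List.mem_cons_self))]
    rw [List.count_cons]
    by_cases h : j = i <;> simp [h, beq_iff_eq] <;> omega

-- --- the 'break' loop: it computes a prefix of the full bucket concatenation ---
theorem brk_stop (rep : Int → List Int) (l : List Int) (t : List Int) (h : 3 ≤ t.length) :
    l.foldl (fun t r => if 3 ≤ t.length then t else t ++ rep r) t = t := by
  induction l with
  | nil => rfl
  | cons r l ih => simp [List.foldl_cons, h, ih]

theorem brk_prefix (rep : Int → List Int) (l : List Int) (t : List Int) :
    (l.foldl (fun t r => if 3 ≤ t.length then t else t ++ rep r) t) <+: t ++ l.flatMap rep := by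
  induction l generalizing t with
  | nil => simp
  | cons r l ih =>
    rw [List.foldl_cons]
    by_cases h : 3 ≤ t.length
    · simp only [if_pos h]
      rw [brk_stop rep l t h]
      exact List.prefix_append t _
    · simp only [if_neg h]
      simpa [List.flatMap_cons, List.append_assoc] using ih (t ++ rep r)

theorem brk_eq_of_lt (rep : Int → List Int) (l : List Int) (t : List Int)
    (h : (l.foldl (fun t r => if 3 ≤ t.length then t else t ++ rep r) t).length < 3) :
    l.foldl (fun t r => if 3 ≤ t.length then t else t ++ rep r) t = t ++ l.flatMap rep := by
  induction l generalizing t with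
  | nil => simp
  | cons r l ih =>
    rw [List.foldl_cons] at h ⊢
    by_cases ht : 3 ≤ t.length
    · rw [if_pos ht] at h ⊢
      rw [brk_stop rep l t ht] at h
      omega
    · rw [if_neg ht] at h ⊢
      rw [ih _ h, List.flatMap_cons, List.append_assoc]

-- --- the bucket concatenation IS the descending sort ---
theorem sum_if_count (rs : List Int) (a : Int) (n : Int → Nat) (hn : rs.Nodup) :
    (rs.map fun r => if a = r then n r else 0).sum = if a ∈ rs then n a else 0 := by
  induction rs with
  | nil => simp
  | cons r t ih =>
    rcases List.nodup_cons.mp hn with ⟨hr, ht⟩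
    by_cases h : a = r
    · subst h
      simp [ih ht, hr]
    · simp [h, ih ht]

theorem count_flatMap_rep (R rs : List Int) (hn : rs.Nodup) (hmem : ∀ x ∈ R, x ∈ rs) (a : Int) :
    (rs.flatMap fun r => List.replicate (R.count r) r).count a = R.count a := by
  rw [List.count_flatMap]
  have heq : (List.count a ∘ fun r => List.replicate (R.count r) r) = fun r => if a = r then R.count r else 0 := by
    funext r
    rw [Function.comp_apply, List.count_replicate]
    by_cases h : a = r <;> simp [h]
    exact fun h' => absurd h'.symm h
  rw [heq]
  rw [sum_if_count rs a (fun r => R.count r) hn]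
  by_cases h : a ∈ rs
  · simp [h]
  · simp [h]
    exact (List.count_eq_zero.mpr (fun hc => h (hmem a hc))).symm

theorem perm_flatMap_rep (R rs : List Int) (hn : rs.Nodup) (hmem : ∀ x ∈ R, x ∈ rs) :
    (rs.flatMap fun r => List.replicate (R.count r) r).Perm R := by
  rw [List.perm_iff_count]
  intro a
  exact count_flatMap_rep R rs hn hmem a

theorem pairwise_flatMap_rep (rs : List Int) (m : Int → Nat) (h : rs.Pairwise (· > ·)) :
    (rs.flatMap fun r => List.replicate (m r) r).Pairwise (· ≥ ·) := by
  induction rs with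
  | nil => simp
  | cons r t ih =>
    rcases List.pairwise_cons.mp h with ⟨hr, ht⟩
    rw [List.flatMap_cons, List.pairwise_append]
    refine ⟨List.pairwise_replicate.mpr (by simp), ih ht, ?_⟩
    intro x hx y hy
    rw [List.eq_of_mem_replicate hx]
    rcases List.mem_flatMap.mp hy with ⟨r', hr', hy'⟩
    rw [List.eq_of_mem_replicate hy']
    exact le_of_lt (hr r' hr')

theorem sorted_desc_eq (R : List Int) (hmem : ∀ x ∈ R, 2 ≤ x ∧ x ≤ 14) :
    PySem.List.sorted R (fun x => x) true
      = (PySem.List.pyRange 14 1 (-1)).flatMap (fun r => List.replicate (R.count r) r) := by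
  have hrs : PySem.List.pyRange 14 1 (-1) = [14,13,12,11,10,9,8,7,6,5,4,3,2] := by decide
  rw [hrs]
  have hperm : (PySem.List.sorted R (fun x => x) true).Perm
      (([14,13,12,11,10,9,8,7,6,5,4,3,2] : List Int).flatMap (fun r => List.replicate (R.count r) r)) :=
    (PySem.List.sorted_perm R (fun x => x) true).trans
      (perm_flatMap_rep R _ (by decide) (fun x hx => by
        have := hmem x hx; simp; omega)).symm
  exact List.Perm.eq_of_pairwise (le := (· ≥ ·))
    (fun a b _ _ h1 h2 => le_antisymm h2 h1)
    (PySem.List.sorted_pairwise_rev R (fun x => x))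
    (pairwise_flatMap_rep [14,13,12,11,10,9,8,7,6,5,4,3,2] _ (by decide)) hperm

theorem getD_prefix (l1 l2 : List Int) (h : l1 <+: l2) (i : Nat) (hi : i < l1.length) :
    l1.getD i 0 = l2.getD i 0 := by
  rw [List.getD_eq_getElem l1 0 hi, List.getD_eq_getElem l2 0 (lt_of_lt_of_le hi h.length_le)]
  exact h.getElem hi

-- the suit-pattern cascade equals (max multiplicity among three suits) - 1
theorem nh_suit_pattern (a b c : Char) :
    (if a = b ∧ b = c then (2:Int)
     else if a = b ∨ b = c ∨ a = c then (if a = b then 1 else if a = c then 1 else 1)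
     else 0)
    = ((PySem.List.max? (PySem.Dict.values (([a,b,c]).foldl
        (fun (d : PySem.Dict Char Int) s => PySem.Dict.insert d s (PySem.Dict.getD d s 0 + 1))
        PySem.Dict.empty)) (fun v => v)).getD 0) - 1 := by
  by_cases hab : a = b <;> by_cases hbc : b = c <;> by_cases hac : a = c <;>
    simp_all [PySem.Dict.insert, PySem.Dict.getD, PySem.Dict.get?, PySem.Dict.values,
      PySem.Dict.contains, PySem.Dict.empty, PySem.List.max?, beq_iff_eq]

-- first three elements of the descending sort of the g-ranks = first three of the break loop
theorem nh_rank_component (cards : List String) (g : String → Int)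
    (hg : ∀ c ∈ cards, 2 ≤ g c ∧ g c ≤ 14) (i : Nat) (hi : i < 3) :
    PySem.List.pyGetD (PySem.List.sorted (cards.map g) (fun x => x) true) (i : Int) 0
      = PySem.List.pyGetD ((PySem.List.pyRange 14 1 (-1)).foldl
          (fun (top : List Int) r =>
            if 3 ≤ top.length then top
            else top ++ List.replicate (PySem.List.pyGetD
              (cards.foldl (fun freq card => listIncr freq (g card).toNat)
                (List.replicate 15 (0 : Int))) r 0).toNat r) []) (i : Int) 0 := by
  have hmemR : ∀ x ∈ cards.map g, 2 ≤ x ∧ x ≤ 14 := by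
    intro x hx
    rcases List.mem_map.mp hx with ⟨c, hc, rfl⟩
    exact hg c hc
  -- the freq loop counts ranks
  have hfreq : ∀ r : Int, 2 ≤ r → r ≤ 14 →
      PySem.List.pyGetD (cards.foldl (fun freq card => listIncr freq (g card).toNat)
        (List.replicate 15 (0 : Int))) r 0 = ((cards.map g).count r : Int) := by
    intro r hr2 hr14
    have hfold : cards.foldl (fun freq card => listIncr freq (g card).toNat)
        (List.replicate 15 (0 : Int))
        = ((cards.map g).map Int.toNat).foldl (fun f i => listIncr f i)
            (List.replicate 15 (0 : Int)) := by
      rw [List.foldl_map, List.foldl_map]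
    rw [hfold]
    have hr : PySem.List.pyGetD (((cards.map g).map Int.toNat).foldl
        (fun f i => listIncr f i) (List.replicate 15 (0 : Int))) r 0
        = (((cards.map g).map Int.toNat).foldl (fun f i => listIncr f i)
            (List.replicate 15 (0 : Int))).getD r.toNat 0 := by
      have h' : (r.toNat : Int) = r := by omega
      conv_lhs => rw [← h']
      rw [nh_pyGetD_getD]
    rw [hr, freq_fold_getD _ _ (by
      intro i hi
      rcases List.mem_map.mp hi with ⟨x, hx, rfl⟩
      have := hmemR x hx
      simp only [List.length_replicate]
      omega) r.toNat]
    have hcnt : ((cards.map g).map Int.toNat).count r.toNat = (cards.map g).count r := by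
      rw [List.count_eq_countP, List.count_eq_countP, List.countP_map]
      apply List.countP_congr
      intro x hx
      have := hmemR x hx
      by_cases h : x = r
      · simp [h]
      · simp [Function.comp, h, beq_iff_eq]
        omega
    rw [hcnt]
    have h0 : (List.replicate 15 (0:Int)).getD r.toNat 0 = 0 := by
      have hlt : r.toNat < 15 := by omega
      rw [List.getD_eq_getElem _ _ (by simpa using hlt)]
      exact List.getElem_replicate _
    rw [h0, zero_add]
  -- replace the freq lookups inside the break loop by rank counts
  have htop : (PySem.List.pyRange 14 1 (-1)).foldl
      (fun (top : List Int) r =>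
        if 3 ≤ top.length then top
        else top ++ List.replicate (PySem.List.pyGetD
          (cards.foldl (fun freq card => listIncr freq (g card).toNat)
            (List.replicate 15 (0 : Int))) r 0).toNat r) []
      = (PySem.List.pyRange 14 1 (-1)).foldl
      (fun (top : List Int) r =>
        if 3 ≤ top.length then top
        else top ++ List.replicate ((cards.map g).count r) r) [] := by
    apply PySem.List.foldl_congr_mem
    intro acc x hx
    have hx' : 2 ≤ x ∧ x ≤ 14 := by
      rw [show PySem.List.pyRange 14 1 (-1) = [14,13,12,11,10,9,8,7,6,5,4,3,2] from by decide] at hx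
      simp at hx
      omega
    rw [hfreq x hx'.1 hx'.2]
    simp
  rw [htop]
  have hF : PySem.List.sorted (cards.map g) (fun x => x) true
      = (PySem.List.pyRange 14 1 (-1)).flatMap
          (fun r => List.replicate ((cards.map g).count r) r) :=
    sorted_desc_eq _ hmemR
  rw [hF, nh_pyGetD_getD, nh_pyGetD_getD]
  set F := (PySem.List.pyRange 14 1 (-1)).flatMap
    (fun r => List.replicate ((cards.map g).count r) r) with hFdef
  set T := (PySem.List.pyRange 14 1 (-1)).foldl
    (fun (top : List Int) r =>
      if 3 ≤ top.length then top
      else top ++ List.replicate ((cards.map g).count r) r) [] with hTdef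
  by_cases hT3 : T.length < 3
  · rw [hTdef, brk_eq_of_lt _ _ _ (by rw [← hTdef]; exact hT3), List.nil_append, ← hFdef]
  · have hpre : T <+: F := by
      rw [hTdef, hFdef]
      simpa using brk_prefix (fun r => List.replicate ((cards.map g).count r) r)
        (PySem.List.pyRange 14 1 (-1)) []
    exact (getD_prefix T F hpre i (by omega)).symm

-- ===== VERDICT (by name: the statement is the Claim_ definition above) =====
set_option maxHeartbeats 1000000 in
theorem normalize_hand_spec : Claim_equal_normalize_hand := by
  intro cards _ hpre
  obtain ⟨hlen, hcards⟩ := hpre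
  unfold Spec_normalize_hand normalize_hand normalize_hand_alt
  simp only [nh_foldl_eq_map, List.nil_append]
  have hg : ∀ c ∈ cards,
      2 ≤ PySem.Dict.getD rankMapA (PySem.List.pyGetD c.toList 0 ' ') 0 ∧
      PySem.Dict.getD rankMapA (PySem.List.pyGetD c.toList 0 ' ') 0 ≤ 14 := by
    intro c hc
    obtain ⟨hclen, hhead⟩ := hcards c hc
    obtain ⟨d, t, hdt⟩ : ∃ d t, c.toList = d :: t := by
      cases h : c.toList with
      | nil => rw [h] at hclen; simp at hclen
      | cons d t => exact ⟨d, t, rfl⟩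
    rw [hdt] at hhead ⊢
    rw [nh_pyGetD_zero]
    exact nh_rank_bounds d (by simpa using hhead)
  refine Prod.ext ?_ (Prod.ext ?_ (Prod.ext ?_ ?_))
  · simpa using nh_rank_component cards _ hg 0 (by omega)
  · simpa using nh_rank_component cards _ hg 1 (by omega)
  · simpa using nh_rank_component cards _ hg 2 (by omega)
  -- the suit pattern
  · obtain ⟨c1, c2, c3, t, ht⟩ : ∃ c1 c2 c3 t, cards = c1 :: c2 :: c3 :: t := by
      match cards, hlen with
      | a :: b :: c :: t, _ => exact ⟨a, b, c, t, rfl⟩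
    rw [PySem.List.slice_to _ (by norm_num)]
    rw [show ((3:Int)).toNat = 3 from rfl]
    subst ht
    simp only [List.map_cons, nh_pyGetD_zero, nh_pyGetD_one, nh_pyGetD_two, List.take_succ_cons,
      List.take_zero]
    simpa using nh_suit_pattern (PySem.List.pyGetD c1.toList 1 ' ')
      (PySem.List.pyGetD c2.toList 1 ' ') (PySem.List.pyGetD c3.toList 1 ' ')
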